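-- pv_equiv track=rewrite | github.com/Haksell/codeforces | problems/1748B.py | f
-- ===== SOURCE A (Python) =====
-- def f(s, k):
--     if k > len(s):
--         return 0
--     d = [0] * 10
--     for i in range(k):
--         d[s[i]] += 1
--     z = 10 - d.count(0)
--     m = max(d)
--     res = max(d) <= z
--     for i in range(k, len(s)):
--         d[s[i]] += 1
--         d[s[i - k]] -= 1
--         if s[i] != s[i - k]:
--             z += (d[s[i]] == 1) - (d[s[i - k]] == 0)
--             if d[s[i]] == m + 1:
--                 m += 1
--             elif d[s[i - k]] == m - 1:
--                 m = max(d)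
--         res += m <= z
--     return res
-- ===== SOURCE B (Python) =====
-- def f(s, k):
--     if k > len(s):
--         return 0
--     d = [0] * 10
--     for x in s[:k]:
--         d[x] += 1
--     res = max(d) <= 10 - d.count(0)
--     for i in range(k, len(s)):
--         d[s[i]] += 1
--         d[s[i - k]] -= 1
--         res += max(d) <= 10 - d.count(0)
--     return res
-- ===== Notes on version B (the rewrite author's own statement) =====
-- stated objective: simpler
-- what changed: B keeps the sliding count array but deletes A's incremental max/zero-count bookkeeping branches, recomputing max(d) and 10 - d.count(0) directly at every window position.
-- outside the precondition, e.g. on f([-5, -3, 5, 2, -2, 4, -6], 2): A returns 6, B returns 5; on f([1, 2], 2): A returns True, B returns True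
import Mathlib
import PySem

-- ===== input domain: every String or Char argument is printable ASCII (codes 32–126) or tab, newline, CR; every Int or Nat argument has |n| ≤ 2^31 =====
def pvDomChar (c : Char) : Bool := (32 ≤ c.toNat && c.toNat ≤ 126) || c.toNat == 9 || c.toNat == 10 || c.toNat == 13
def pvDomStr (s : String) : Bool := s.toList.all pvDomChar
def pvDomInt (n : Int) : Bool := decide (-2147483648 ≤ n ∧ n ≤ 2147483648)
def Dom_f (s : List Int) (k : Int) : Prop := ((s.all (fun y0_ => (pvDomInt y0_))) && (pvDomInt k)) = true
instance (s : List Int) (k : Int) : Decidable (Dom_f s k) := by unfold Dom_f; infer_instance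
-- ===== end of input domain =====

-- B drops A's incremental max/zero-count bookkeeping and recomputes max(d) and 10 - d.count(0)
-- at every window position (objective: simpler; same asymptotic cost).

-- shared small helpers (each transliterates a single Python expression)
-- d[x] += δ  (read-then-write; exact for -len(d) ≤ x < len(d), Python's index rule)
def pvBump (d : List Int) (x : Int) (δ : Int) : List Int :=
  PySem.List.pySetD d x (PySem.List.pyGetD d x 0 + δ)
-- max(d)  (d is always the nonempty 10-cell count array)
def pvMax (d : List Int) : Int := (PySem.List.max? d (fun y => y)).getD 0
-- 10 - d.count(0)
def pvZ (d : List Int) : Int := 10 - (PySem.List.count d 0 : Int)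

-- ===== PORT A =====
def pvStepA (s : List Int) (k : Int) (st : List Int × Int × Int × Int) (i : Int) :
    List Int × Int × Int × Int :=
  let a := PySem.List.pyGetD s i 0
  let b := PySem.List.pyGetD s (i - k) 0
  let d := pvBump (pvBump st.1 a 1) b (-1)
  let z := st.2.1
  let m := st.2.2.1
  let zm :=
    if a ≠ b then
      let z' := z + ((if PySem.List.pyGetD d a 0 = 1 then (1 : Int) else 0)
                     - (if PySem.List.pyGetD d b 0 = 0 then (1 : Int) else 0))
      let m' := if PySem.List.pyGetD d a 0 = m + 1 then m + 1
                else if PySem.List.pyGetD d b 0 = m - 1 then pvMax d else m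
      (z', m')
    else (z, m)
  (d, zm.1, zm.2, st.2.2.2 + (if zm.2 ≤ zm.1 then (1 : Int) else 0))

def f (s : List Int) (k : Int) : Int :=
  if k > PySem.List.len s then 0
  else
    let d := (PySem.List.pyRange 0 k 1).foldl
      (fun d i => pvBump d (PySem.List.pyGetD s i 0) 1) (List.replicate 10 0)
    let z := pvZ d
    let m := pvMax d
    let res : Int := if pvMax d ≤ z then 1 else 0
    ((PySem.List.pyRange k (PySem.List.len s) 1).foldl (pvStepA s k) (d, z, m, res)).2.2.2

-- ===== PORT B =====
def pvStepB (s : List Int) (k : Int) (st : List Int × Int) (i : Int) : List Int × Int :=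
  let d := pvBump (pvBump st.1 (PySem.List.pyGetD s i 0) 1) (PySem.List.pyGetD s (i - k) 0) (-1)
  (d, st.2 + (if pvMax d ≤ pvZ d then (1 : Int) else 0))

def f_alt (s : List Int) (k : Int) : Int :=
  if k > PySem.List.len s then 0
  else
    let d := (PySem.List.slice s none (some k)).foldl (fun d x => pvBump d x 1)
      (List.replicate 10 0)
    let res : Int := if pvMax d ≤ pvZ d then 1 else 0
    ((PySem.List.pyRange k (PySem.List.len s) 1).foldl (pvStepB s k) (d, res)).2

-- ===== PRECONDITION & SPEC =====
-- Pre_ is the function's natural domain: either k > len(s) (both return 0 whatever s holds), or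
-- 0 ≤ k < len(s) with every element a digit 0–9 (the count array has 10 cells). Outside it A
-- raises IndexError (elements ≥ 10 or < -10; every k < 0 reaches s[len(s)-1-k], out of range),
-- except (1) k = len(s), where A returns a bool (True/False), not a value of the declared int
-- return type, and (2) elements in -10..-1, where A returns via Python's negative-index
-- wraparound into the count array — an off-domain accident Pre_ excludes rather than specifies.
def Pre_f (s : List Int) (k : Int) : Prop :=
  PySem.List.len s < k ∨ (0 ≤ k ∧ k ≠ PySem.List.len s ∧ ∀ x ∈ s, 0 ≤ x ∧ x < 10)
instance (s : List Int) (k : Int) : Decidable (Pre_f s k) := by unfold Pre_f; infer_instance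
def pvWitness_f : List Int × Int := ([1, 2, 1, 0], 2)

def Spec_f (s : List Int) (k : Int) (out : Int) : Prop := out = f_alt s k
instance (s : List Int) (k : Int) (out : Int) : Decidable (Spec_f s k out) := by
  unfold Spec_f; infer_instance

-- ===== CLAIM (what is proved, stated in full; the proofs are below) =====
def Claim_equal_f : Prop := ∀ (s : List Int) (k : Int), Dom_f s k → Pre_f s k → Spec_f s k (f s k)

-- ===== LEMMAS AND PROOFS =====

-- the count-array cell Python's d[x] touches for -10 ≤ x < 10 (negative indices wrap)
def pvCls (x : Int) : Nat := (x % 10).toNat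
-- occupancy of cell j in window w
def pvCnt (w : List Int) (j : Nat) : Nat := w.countP (fun x => pvCls x == j)
def pvCtr (w : List Int) : List Int := (List.range 10).map (fun j => (pvCnt w j : Int))

theorem pvCls_lt (x : Int) : pvCls x < 10 := by unfold pvCls; omega

theorem len_pvCtr (w : List Int) : (pvCtr w).length = 10 := by simp [pvCtr]

theorem getElem_pvCtr (w : List Int) (j : Nat) (hj : j < (pvCtr w).length) :
    (pvCtr w)[j] = ((pvCnt w j : Nat) : Int) := by
  simp [pvCtr]

theorem getD_pvCtr (w : List Int) (j : Nat) (hj : j < 10) :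
    (pvCtr w).getD j 0 = ((pvCnt w j : Nat) : Int) := by
  rw [List.getD_eq_getElem _ 0 (by rw [len_pvCtr]; omega), getElem_pvCtr]

theorem pvCtr_congr (w w' : List Int) (h : ∀ j : Nat, pvCnt w j = pvCnt w' j) :
    pvCtr w = pvCtr w' := by
  unfold pvCtr
  exact List.map_congr_left (fun j _ => by rw [h])

theorem get_pvCtr (w : List Int) (x : Int) (hlo : -10 ≤ x) (hhi : x < 10) :
    PySem.List.pyGetD (pvCtr w) x 0 = ((pvCnt w (pvCls x) : Nat) : Int) := by
  by_cases h0 : 0 ≤ x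
  · rw [PySem.List.pyGetD_eq_getElem (pvCtr w) 0 h0 (by rw [len_pvCtr]; omega),
        getElem_pvCtr]
    congr 2
    unfold pvCls; omega
  · have hk : x = -(((-x).toNat : Nat) : Int) := by omega
    have hkpos : 0 < (-x).toNat := by omega
    have hkle : (-x).toNat ≤ (pvCtr w).length := by rw [len_pvCtr]; omega
    rw [hk, PySem.List.pyGetD_neg_natCast (pvCtr w) (-x).toNat 0 hkpos hkle,
        getElem_pvCtr]
    congr 2
    unfold pvCls
    rw [len_pvCtr]
    omega

theorem bump_eq_set (d : List Int) (x : Int) (δ : Int) (hlo : -10 ≤ x) (hhi : x < 10)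
    (hlen : d.length = 10) :
    pvBump d x δ = d.set (pvCls x) (d.getD (pvCls x) 0 + δ) := by
  unfold pvBump
  by_cases h0 : 0 ≤ x
  · have hcls : pvCls x = x.toNat := by unfold pvCls; omega
    rw [PySem.List.pySetD_of_nonneg d _ h0,
        PySem.List.pyGetD_eq_getElem d 0 h0 (by omega), hcls,
        List.getD_eq_getElem d 0 (by omega)]
  · have hk : x = -(((-x).toNat : Nat) : Int) := by omega
    have hkpos : 0 < (-x).toNat := by omega
    have hkle : (-x).toNat ≤ d.length := by omega
    rw [hk, PySem.List.pyGetD_neg_natCast d (-x).toNat 0 hkpos hkle]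
    have hcls : pvCls (-(((-x).toNat : Nat) : Int)) = d.length - (-x).toNat := by
      unfold pvCls; omega
    rw [hcls, List.getD_eq_getElem d 0 (by omega)]
    -- negative-index write: unfold the pySetD primitive (exact for -len ≤ x < 0)
    unfold PySem.List.pySetD PySem.List.pySet? PySem.List.pyIdx?
    rw [if_neg (by omega), if_pos (by omega)]
    simp
    congr 1
    omega

theorem bump_pvCtr_inc (w : List Int) (a : Int) (hlo : -10 ≤ a) (hhi : a < 10) :
    pvBump (pvCtr w) a 1 = pvCtr (w ++ [a]) := by
  rw [bump_eq_set (pvCtr w) a 1 hlo hhi (len_pvCtr w)]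
  apply List.ext_getElem (by simp [len_pvCtr])
  intro j hj hj'
  have hj10 : j < 10 := by simpa [len_pvCtr] using hj'
  simp only [List.getElem_set, getElem_pvCtr, getD_pvCtr _ _ (pvCls_lt a)]
  by_cases hja : pvCls a = j
  · rw [if_pos hja]
    have e : pvCnt (w ++ [a]) j = pvCnt w (pvCls a) + 1 := by
      simp [pvCnt, List.countP_append, hja]
    rw [e]
    push_cast
    omega
  · rw [if_neg hja]
    have e : pvCnt (w ++ [a]) j = pvCnt w j := by
      simp [pvCnt, List.countP_append, hja]
    rw [e]

theorem bump_pvCtr_dec (b : Int) (t : List Int) (hlo : -10 ≤ b) (hhi : b < 10) :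
    pvBump (pvCtr (b :: t)) b (-1) = pvCtr t := by
  rw [bump_eq_set (pvCtr (b :: t)) b (-1) hlo hhi (len_pvCtr _)]
  apply List.ext_getElem (by simp [len_pvCtr])
  intro j hj hj'
  have hj10 : j < 10 := by simpa [len_pvCtr] using hj'
  simp only [List.getElem_set, getElem_pvCtr, getD_pvCtr _ _ (pvCls_lt b)]
  by_cases hjb : pvCls b = j
  · rw [if_pos hjb]
    have e : pvCnt (b :: t) (pvCls b) = pvCnt t j + 1 := by
      simp [pvCnt, List.countP_cons, hjb]
    rw [e]
    push_cast
    omega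
  · rw [if_neg hjb]
    have e : pvCnt (b :: t) j = pvCnt t j := by
      simp [pvCnt, List.countP_cons, hjb]
    rw [e]

theorem pvMax_spec (w : List Int) :
    (∀ j : Nat, j < 10 → ((pvCnt w j : Nat) : Int) ≤ pvMax (pvCtr w)) ∧
    (∃ j : Nat, j < 10 ∧ ((pvCnt w j : Nat) : Int) = pvMax (pvCtr w)) := by
  cases h : PySem.List.max? (pvCtr w) (fun y => y) with
  | none =>
      exfalso
      have := (PySem.List.max?_eq_none_iff (pvCtr w) (fun y => y)).mp h
      have hl := len_pvCtr w
      simp [this] at hl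
  | some m =>
      have hmax := PySem.List.max?_isMax h
      have hmem := PySem.List.max?_mem h
      have hM : pvMax (pvCtr w) = m := by simp [pvMax, h]
      constructor
      · intro j hj
        rw [hM]
        apply hmax
        have : ((pvCnt w j : Nat) : Int) = (pvCtr w)[j]'(by rw [len_pvCtr]; omega) := by
          rw [getElem_pvCtr]
        rw [this]
        exact List.getElem_mem _
      · rw [hM]
        unfold pvCtr at hmem
        rcases List.mem_map.mp hmem with ⟨j, hj, hval⟩
        exact ⟨j, by simpa using List.mem_range.mp hj, hval⟩

theorem pvMax_eq_of (w : List Int) (M : Int)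
    (hub : ∀ j : Nat, j < 10 → ((pvCnt w j : Nat) : Int) ≤ M)
    (hatt : ∃ j : Nat, j < 10 ∧ ((pvCnt w j : Nat) : Int) = M) :
    pvMax (pvCtr w) = M := by
  obtain ⟨hub', j0, hj0, hatt'⟩ := pvMax_spec w
  rcases hatt with ⟨j1, hj1, he⟩
  have h1 : pvMax (pvCtr w) ≤ M := by rw [← hatt']; exact hub j0 hj0
  have h2 : M ≤ pvMax (pvCtr w) := by rw [← he]; exact hub' j1 hj1
  omega

theorem countP_one_diff (l : List Nat) (p q : Nat → Bool) (A : Nat)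
    (hnd : l.Nodup) (hA : A ∈ l) (hsame : ∀ j ∈ l, j ≠ A → p j = q j) :
    (l.countP q : Int) = (l.countP p : Int)
      + ((if q A then 1 else 0) - (if p A then 1 else 0)) := by
  induction l with
  | nil => cases hA
  | cons x t ih =>
      rw [List.countP_cons, List.countP_cons]
      have hxt : x ∉ t := (List.nodup_cons.mp hnd).1
      rcases List.mem_cons.mp hA with hxA | hAt
      · subst hxA
        have : t.countP p = t.countP q :=
          List.countP_congr (fun j hj => by
            rw [hsame j (List.mem_cons_of_mem _ hj) (fun h => hxt (h ▸ hj))])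
        rw [this]
        push_cast
        split_ifs <;> omega
      · have hxA : x ≠ A := fun h => (List.nodup_cons.mp hnd).1 (h ▸ hAt)
        have hpx : p x = q x := hsame x (List.mem_cons_self ..) hxA
        rw [hpx]
        have := ih (List.nodup_cons.mp hnd).2 hAt
          (fun j hj hjA => hsame j (List.mem_cons_of_mem _ hj) hjA)
        push_cast at this ⊢
        split_ifs at this ⊢ <;> omega

theorem countP_two_diff (l : List Nat) (p q : Nat → Bool) (A B : Nat)
    (hnd : l.Nodup) (hA : A ∈ l) (hB : B ∈ l) (hAB : A ≠ B)
    (hsame : ∀ j ∈ l, j ≠ A → j ≠ B → p j = q j) :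
    (l.countP q : Int) = (l.countP p : Int)
      + ((if q A then 1 else 0) - (if p A then 1 else 0))
      + ((if q B then 1 else 0) - (if p B then 1 else 0)) := by
  induction l with
  | nil => cases hA
  | cons x t ih =>
      rw [List.countP_cons, List.countP_cons]
      have hxt : x ∉ t := (List.nodup_cons.mp hnd).1
      have hndt := (List.nodup_cons.mp hnd).2
      rcases List.mem_cons.mp hA with hxA | hAt
      · subst hxA
        have hBt : B ∈ t := by
          rcases List.mem_cons.mp hB with h | h
          · exact absurd h.symm hAB
          · exact h
        have := countP_one_diff t p q B hndt hBt
          (fun j hj hjB => hsame j (List.mem_cons_of_mem _ hj) (fun h => hxt (h ▸ hj)) hjB)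
        push_cast at this ⊢
        split_ifs at this ⊢ <;> omega
      · rcases List.mem_cons.mp hB with hxB | hBt
        · subst hxB
          have := countP_one_diff t p q A hndt hAt
            (fun j hj hjA => hsame j (List.mem_cons_of_mem _ hj) hjA (fun h => hxt (h ▸ hj)))
          push_cast at this ⊢
          split_ifs at this ⊢ <;> omega
        · have hxA : x ≠ A := fun h => hxt (h ▸ hAt)
          have hxB : x ≠ B := fun h => hxt (h ▸ hBt)
          rw [hsame x (List.mem_cons_self ..) hxA hxB]
          have := ih hndt hAt hBt
            (fun j hj hjA hjB => hsame j (List.mem_cons_of_mem _ hj) hjA hjB)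
          push_cast at this ⊢
          split_ifs at this ⊢ <;> omega

theorem pvZ_eq_countP (w : List Int) :
    pvZ (pvCtr w) = 10 - ((List.range 10).countP (fun j => pvCnt w j == 0) : Int) := by
  unfold pvZ
  rw [PySem.List.count_eq]
  unfold pvCtr
  rw [List.count_eq_countP, List.countP_map]
  congr 1
  apply congrArg
  apply List.countP_congr
  intro j hj
  simp

theorem cnt_same (t : List Int) (a b : Int) (j : Nat)
    (hja : j ≠ pvCls a) (hjb : j ≠ pvCls b) :
    pvCnt (b :: t) j = pvCnt (t ++ [a]) j := by
  have h1 : pvCls a ≠ j := fun h => hja h.symm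
  have h2 : pvCls b ≠ j := fun h => hjb h.symm
  simp [pvCnt, List.countP_cons, List.countP_append, h1, h2]

theorem cnt_a (t : List Int) (a b : Int) (hab : pvCls a ≠ pvCls b) :
    pvCnt (t ++ [a]) (pvCls a) = pvCnt (b :: t) (pvCls a) + 1 := by
  have h : pvCls b ≠ pvCls a := fun h => hab h.symm
  simp [pvCnt, List.countP_cons, List.countP_append, h]

theorem cnt_b (t : List Int) (a b : Int) (hab : pvCls a ≠ pvCls b) :
    pvCnt (b :: t) (pvCls b) = pvCnt (t ++ [a]) (pvCls b) + 1 := by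
  simp [pvCnt, List.countP_cons, List.countP_append, hab]

theorem pvZ_step (t : List Int) (a b : Int) (hab : pvCls a ≠ pvCls b) :
    pvZ (pvCtr (t ++ [a])) =
      pvZ (pvCtr (b :: t)) +
        ((if ((pvCnt (t ++ [a]) (pvCls a) : Nat) : Int) = 1 then (1 : Int) else 0)
          - (if ((pvCnt (t ++ [a]) (pvCls b) : Nat) : Int) = 0 then (1 : Int) else 0)) := by
  rw [pvZ_eq_countP, pvZ_eq_countP]
  have key := countP_two_diff (List.range 10)
      (fun j => pvCnt (b :: t) j == 0)
      (fun j => pvCnt (t ++ [a]) j == 0)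
      (pvCls a) (pvCls b) (List.nodup_range) (List.mem_range.mpr (pvCls_lt a))
      (List.mem_range.mpr (pvCls_lt b)) hab
      (fun j hj hjA hjB => by simp only [cnt_same t a b j hjA hjB])
  have e1 := cnt_a t a b hab
  have e2 := cnt_b t a b hab
  simp only [beq_iff_eq] at key
  push_cast at key ⊢
  split_ifs at key ⊢ <;> omega

theorem pvMax_step (t : List Int) (a b : Int) (hab : pvCls a ≠ pvCls b) :
    (if ((pvCnt (t ++ [a]) (pvCls a) : Nat) : Int) = pvMax (pvCtr (b :: t)) + 1
       then pvMax (pvCtr (b :: t)) + 1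
     else if ((pvCnt (t ++ [a]) (pvCls b) : Nat) : Int) = pvMax (pvCtr (b :: t)) - 1
       then pvMax (pvCtr (t ++ [a]))
     else pvMax (pvCtr (b :: t))) = pvMax (pvCtr (t ++ [a])) := by
  obtain ⟨hub, j0, hj0, hatt⟩ := pvMax_spec (b :: t)
  set M := pvMax (pvCtr (b :: t)) with hM
  have e1 := cnt_a t a b hab
  have e2 := cnt_b t a b hab
  have huba := hub (pvCls a) (pvCls_lt a)
  have hubb := hub (pvCls b) (pvCls_lt b)
  by_cases h1 : ((pvCnt (t ++ [a]) (pvCls a) : Nat) : Int) = M + 1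
  · rw [if_pos h1]
    refine (pvMax_eq_of _ (M + 1) ?_ ⟨pvCls a, pvCls_lt a, h1⟩).symm
    intro j hj
    by_cases hja : j = pvCls a
    · subst hja; omega
    · by_cases hjb : j = pvCls b
      · subst hjb; omega
      · rw [← cnt_same t a b j hja hjb]
        exact le_trans (hub j hj) (by omega)
  · by_cases h2 : ((pvCnt (t ++ [a]) (pvCls b) : Nat) : Int) = M - 1
    · rw [if_neg h1, if_pos h2]
    · rw [if_neg h1, if_neg h2]
      refine (pvMax_eq_of _ M ?_ ?_).symm
      · intro j hj
        by_cases hja : j = pvCls a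
        · subst hja; omega
        · by_cases hjb : j = pvCls b
          · subst hjb; omega
          · rw [← cnt_same t a b j hja hjb]
            exact hub j hj
      · refine ⟨j0, hj0, ?_⟩
        have hja : j0 ≠ pvCls a := by
          intro h; subst h; omega
        have hjb : j0 ≠ pvCls b := by
          intro h; subst h; omega
        rw [← cnt_same t a b j0 hja hjb]
        exact hatt

theorem bump_cancel (d : List Int) (x : Int) (hlo : -10 ≤ x) (hhi : x < 10)
    (hlen : d.length = 10) :
    pvBump (pvBump d x 1) x (-1) = d := by
  have hc := pvCls_lt x
  rw [bump_eq_set d x 1 hlo hhi hlen,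
      bump_eq_set _ x (-1) hlo hhi (by simpa using hlen)]
  rw [List.getD_eq_getElem _ 0 (by simpa [hlen] using hc),
      List.getD_eq_getElem _ 0 (by simp [hlen]; omega),
      List.getElem_set_self, List.set_set]
  have : d[pvCls x]'(by omega) + 1 + -1 = d[pvCls x]'(by omega) := by omega
  rw [this, List.set_getElem_self]

theorem foldl_bump_pvCtr (w : List Int) (hw : ∀ x ∈ w, -10 ≤ x ∧ x < 10) :
    w.foldl (fun d x => pvBump d x 1) (List.replicate 10 0) = pvCtr w := by
  induction w using List.reverseRecOn with
  | nil => decide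
  | append_singleton t x ih =>
      rw [List.foldl_append, List.foldl_cons, List.foldl_nil]
      rw [ih (fun y hy => hw y (List.mem_append_left _ hy))]
      exact bump_pvCtr_inc t x (hw x (by simp)).1 (hw x (by simp)).2

theorem loop_eq (s : List Int) (k : Int) (hs : ∀ x ∈ s, -10 ≤ x ∧ x < 10)
    (hinj : ∀ x ∈ s, ∀ y ∈ s, pvCls x = pvCls y → x = y) (hk : 0 ≤ k) :
    ∀ (c p : Nat), p + c = s.length → k.toNat ≤ p → ∀ (r : Int),
      ((PySem.List.pyRange (p : Int) (s.length : Int) 1).foldl (pvStepA s k)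
        (pvCtr ((s.drop (p - k.toNat)).take k.toNat),
          pvZ (pvCtr ((s.drop (p - k.toNat)).take k.toNat)),
          pvMax (pvCtr ((s.drop (p - k.toNat)).take k.toNat)), r)).2.2.2
      = ((PySem.List.pyRange (p : Int) (s.length : Int) 1).foldl (pvStepB s k)
          (pvCtr ((s.drop (p - k.toNat)).take k.toNat), r)).2 := by
  intro c
  induction c with
  | zero =>
      intro p hp hkp r
      rw [PySem.List.pyRange_one_eq_nil (by omega)]
      simp
  | succ c ih =>
      intro p hp hkp r
      have hpn : p < s.length := by omega
      have hlt : ((p : Nat) : Int) < ((s.length : Nat) : Int) := by omega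
      rw [PySem.List.pyRange_one_cons hlt]
      rw [List.foldl_cons, List.foldl_cons]
      set kn := k.toNat with hkn
      have hkk : k = ((kn : Nat) : Int) := by omega
      have ha : PySem.List.pyGetD s ((p : Nat) : Int) 0 = s[p] :=
        PySem.List.pyGetD_eq_getElem s 0 (by omega) (by omega)
      have hib : ((p : Nat) : Int) - k = (((p - kn : Nat) : Nat) : Int) := by omega
      have hb : PySem.List.pyGetD s (((p : Nat) : Int) - k) 0 = s[p - kn]'(by omega) := by
        rw [hib, PySem.List.pyGetD_eq_getElem s 0 (by omega) (by omega)]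
        simp
      have hsa := hs s[p] (List.getElem_mem _)
      have hsb := hs (s[p - kn]'(by omega)) (List.getElem_mem _)
      rcases Nat.eq_zero_or_pos kn with hkn0 | hknpos
      · -- k == 0: the added and removed cells coincide, d is unchanged
        have hpk : ((p : Nat) : Int) - k = ((p : Nat) : Int) := by omega
        have htz : ∀ q : Nat, (s.drop (q - kn)).take kn = ([] : List Int) := by
          intro q; rw [hkn0]; simp
        rw [htz p]
        have hd : pvBump (pvBump (pvCtr []) (PySem.List.pyGetD s ((p : Nat) : Int) 0) 1)
            (PySem.List.pyGetD s ((p : Nat) : Int) 0) (-1) = pvCtr [] := by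
          apply bump_cancel
          · rw [ha]; exact hsa.1
          · rw [ha]; exact hsa.2
          · exact len_pvCtr []
        have hA : pvStepA s k (pvCtr [], pvZ (pvCtr []), pvMax (pvCtr []), r) ((p : Nat) : Int)
            = (pvCtr [], pvZ (pvCtr []), pvMax (pvCtr []),
                r + (if pvMax (pvCtr []) ≤ pvZ (pvCtr []) then (1 : Int) else 0)) := by
          simp only [pvStepA, hpk, hd]
          simp
        have hB : pvStepB s k (pvCtr [], r) ((p : Nat) : Int)
            = (pvCtr [], r + (if pvMax (pvCtr []) ≤ pvZ (pvCtr []) then (1 : Int) else 0)) := by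
          simp only [pvStepB, hpk, hd]
        rw [hA, hB]
        have hih := ih (p + 1) (by omega) (by omega)
          (r + (if pvMax (pvCtr []) ≤ pvZ (pvCtr []) then (1 : Int) else 0))
        rw [htz (p + 1)] at hih
        have hcast : (((p + 1 : Nat)) : Int) = ((p : Nat) : Int) + 1 := by omega
        rw [hcast] at hih
        exact hih
      · -- k ≥ 1: window loses its head and gains s[p]
        have hbpn : p - kn < s.length := by omega
        set b0 := s[p - kn]'(by omega) with hb0
        set t0 := (s.drop (p - kn + 1)).take (kn - 1) with ht0
        set a0 := s[p] with ha0
        have htakepos : ∀ (m : Nat), 0 < m → ∀ (x : Int) (l : List Int),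
            List.take m (x :: l) = x :: List.take (m - 1) l := by
          intro m hm x l
          obtain ⟨m', rfl⟩ : ∃ m', m = m' + 1 := ⟨m - 1, by omega⟩
          simp [List.take_succ_cons]
        have htakelast : ∀ (m : Nat), 0 < m → ∀ (l : List Int),
            List.take m l = List.take (m - 1) l ++ l[m - 1]?.toList := by
          intro m hm l
          obtain ⟨m', rfl⟩ : ∃ m', m = m' + 1 := ⟨m - 1, by omega⟩
          simp [List.take_add_one]
        have hw : (s.drop (p - kn)).take kn = b0 :: t0 := by
          rw [List.drop_eq_getElem_cons hbpn]
          rw [htakepos kn hknpos]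
        have hw' : (s.drop (p + 1 - kn)).take kn = t0 ++ [a0] := by
          have e1 : p + 1 - kn = p - kn + 1 := by omega
          rw [e1, htakelast kn hknpos]
          congr 1
          rw [List.getElem?_drop]
          have e2 : p - kn + 1 + (kn - 1) = p := by omega
          rw [e2, List.getElem?_eq_getElem hpn]
          rfl
        have hd : pvBump (pvBump (pvCtr (b0 :: t0)) a0 1) b0 (-1) = pvCtr (t0 ++ [a0]) := by
          rw [bump_pvCtr_inc _ a0 hsa.1 hsa.2]
          have e : (b0 :: t0) ++ [a0] = b0 :: (t0 ++ [a0]) := rfl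
          rw [e, bump_pvCtr_dec b0 _ hsb.1 hsb.2]
        rw [hw]
        by_cases hv : a0 = b0
        · -- equal values: counter unchanged as a multiset of counts
          have hctr : pvCtr (t0 ++ [a0]) = pvCtr (b0 :: t0) := by
            apply pvCtr_congr
            intro j
            rw [← hv]
            simp [pvCnt, List.countP_append, List.countP_cons, Nat.add_comm]
          have hA : pvStepA s k (pvCtr (b0 :: t0), pvZ (pvCtr (b0 :: t0)),
              pvMax (pvCtr (b0 :: t0)), r) ((p : Nat) : Int)
              = (pvCtr (t0 ++ [a0]), pvZ (pvCtr (b0 :: t0)), pvMax (pvCtr (b0 :: t0)),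
                  r + (if pvMax (pvCtr (b0 :: t0)) ≤ pvZ (pvCtr (b0 :: t0)) then (1 : Int) else 0)) := by
            simp only [pvStepA, ha, hb, ← hb0, ← ha0, hd]
            rw [if_neg (not_not_intro hv)]
          have hB : pvStepB s k (pvCtr (b0 :: t0), r) ((p : Nat) : Int)
              = (pvCtr (t0 ++ [a0]),
                  r + (if pvMax (pvCtr (t0 ++ [a0])) ≤ pvZ (pvCtr (t0 ++ [a0])) then (1 : Int) else 0)) := by
            simp only [pvStepB, ha, hb, hd, ← hb0, ← ha0]
          rw [hA, hB, hctr]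
          have hih := ih (p + 1) (by omega) (by omega)
            (r + (if pvMax (pvCtr (b0 :: t0)) ≤ pvZ (pvCtr (b0 :: t0)) then (1 : Int) else 0))
          rw [hw'] at hih
          have hcast : (((p + 1 : Nat)) : Int) = ((p : Nat) : Int) + 1 := by omega
          rw [hcast] at hih
          rw [hctr] at hih
          exact hih
        · -- distinct values: the incremental z/m updates equal the recomputed values
          have hclsne : pvCls a0 ≠ pvCls b0 := fun h =>
            hv (hinj a0 (ha0 ▸ List.getElem_mem _) b0 (hb0 ▸ List.getElem_mem _) h)
          have hga : PySem.List.pyGetD (pvCtr (t0 ++ [a0])) a0 0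
              = ((pvCnt (t0 ++ [a0]) (pvCls a0) : Nat) : Int) := get_pvCtr _ _ hsa.1 hsa.2
          have hgb : PySem.List.pyGetD (pvCtr (t0 ++ [a0])) b0 0
              = ((pvCnt (t0 ++ [a0]) (pvCls b0) : Nat) : Int) := get_pvCtr _ _ hsb.1 hsb.2
          have hz := pvZ_step t0 a0 b0 hclsne
          have hm := pvMax_step t0 a0 b0 hclsne
          have hA : pvStepA s k (pvCtr (b0 :: t0), pvZ (pvCtr (b0 :: t0)),
              pvMax (pvCtr (b0 :: t0)), r) ((p : Nat) : Int)
              = (pvCtr (t0 ++ [a0]), pvZ (pvCtr (t0 ++ [a0])), pvMax (pvCtr (t0 ++ [a0])),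
                  r + (if pvMax (pvCtr (t0 ++ [a0])) ≤ pvZ (pvCtr (t0 ++ [a0])) then (1 : Int) else 0)) := by
            simp only [pvStepA, ha, hb, ← hb0, ← ha0, hd]
            rw [if_pos hv, hga, hgb, ← hz, hm]
          have hB : pvStepB s k (pvCtr (b0 :: t0), r) ((p : Nat) : Int)
              = (pvCtr (t0 ++ [a0]),
                  r + (if pvMax (pvCtr (t0 ++ [a0])) ≤ pvZ (pvCtr (t0 ++ [a0])) then (1 : Int) else 0)) := by
            simp only [pvStepB, ha, hb, ← hb0, ← ha0, hd]
          rw [hA, hB]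
          have hih := ih (p + 1) (by omega) (by omega)
            (r + (if pvMax (pvCtr (t0 ++ [a0])) ≤ pvZ (pvCtr (t0 ++ [a0])) then (1 : Int) else 0))
          rw [hw'] at hih
          have hcast : (((p + 1 : Nat)) : Int) = ((p : Nat) : Int) + 1 := by omega
          rw [hcast] at hih
          exact hih

-- ===== VERDICT (by name: the statement is the Claim_ definition above) =====
theorem f_spec : Claim_equal_f := by
  intro s k _hdom hpre
  rcases hpre with hbig | ⟨hk, _hkne, hdig⟩
  · unfold Spec_f f f_alt
    rw [if_pos hbig, if_pos hbig]
  have hs : ∀ x ∈ s, -10 ≤ x ∧ x < 10 := by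
    intro x hx
    have := hdig x hx
    omega
  have hinj : ∀ x ∈ s, ∀ y ∈ s, pvCls x = pvCls y → x = y := by
    intro x hx y hy h
    have bx := hdig x hx
    have by' := hdig y hy
    unfold pvCls at h
    omega
  unfold Spec_f f f_alt
  by_cases hgt : k > PySem.List.len s
  · rw [if_pos hgt, if_pos hgt]
  · rw [if_neg hgt, if_neg hgt]
    have hn : k.toNat ≤ s.length := by rw [PySem.List.len_eq] at hgt; omega
    have hsl : PySem.List.slice s none (some k) = s.take k.toNat := PySem.List.slice_to s hk
    have hlen : PySem.List.len (s.take k.toNat) = k := by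
      rw [PySem.List.len_eq]; simp; omega
    have hcong : ∀ (acc : List Int), ∀ j ∈ PySem.List.pyRange 0 (PySem.List.len (s.take k.toNat)),
        pvBump acc (PySem.List.pyGetD s j 0) 1
          = pvBump acc (PySem.List.pyGetD (s.take k.toNat) j 0) 1 := by
      intro acc j hj
      rw [hlen] at hj
      obtain ⟨hj0, hj1⟩ := (PySem.List.mem_pyRange_one).mp hj
      congr 1
      rw [PySem.List.pyGetD_eq_getElem s 0 hj0 (by omega),
          PySem.List.pyGetD_eq_getElem (s.take k.toNat) 0 hj0
            (by simp [List.length_take]; omega)]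
      rw [List.getElem_take]
    have hAinit : (PySem.List.pyRange 0 k).foldl
        (fun d i => pvBump d (PySem.List.pyGetD s i 0) 1) (List.replicate 10 0)
        = pvCtr (s.take k.toNat) := by
      conv_lhs => rw [← hlen]
      rw [PySem.List.foldl_congr_mem _ _ _ _ hcong]
      rw [PySem.List.foldl_pyRange_zero_pyGetD (s.take k.toNat) 0 (fun d x => pvBump d x 1)]
      exact foldl_bump_pvCtr _ (fun x hx => hs x (List.mem_of_mem_take hx))
    have hBinit : (PySem.List.slice s none (some k)).foldl
        (fun d x => pvBump d x 1) (List.replicate 10 0) = pvCtr (s.take k.toNat) := by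
      rw [hsl]
      exact foldl_bump_pvCtr _ (fun x hx => hs x (List.mem_of_mem_take hx))
    rw [hAinit, hBinit]
    have hkk : k = ((k.toNat : Nat) : Int) := by omega
    have hrange : PySem.List.pyRange k (PySem.List.len s)
        = PySem.List.pyRange ((k.toNat : Nat) : Int) ((s.length : Nat) : Int) := by
      rw [PySem.List.len_eq, ← hkk]
    rw [hrange]
    have hwin : (s.drop (k.toNat - k.toNat)).take k.toNat = s.take k.toNat := by
      simp
    have := loop_eq s k hs hinj hk (s.length - k.toNat) k.toNat (by omega) (le_refl _)
      (if pvMax (pvCtr (s.take k.toNat)) ≤ pvZ (pvCtr (s.take k.toNat)) then (1 : Int) else 0)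
    rw [hwin] at this
    exact this
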